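-- pv_equiv track=rewrite | github.com/juggernaut2005ua/langapp | auth/password_utils.py | get_password_strength_message
-- ===== SOURCE A (Python) =====
-- def get_password_strength_message(password):
--     """
--     Zwraca komunikat o sile hasła i co trzeba poprawić.
--     """
--     messages = []
--
--     if len(password) < 8:
--         messages.append("Hasło musi mieć co najmniej 8 znaków.")
--
--     if not any(char.isdigit() for char in password):
--         messages.append("Hasło musi zawierać co najmniej jedną cyfrę.")
--
--     if not any(char.islower() for char in password):
--         messages.append("Hasło musi zawierać co najmniej jedną małą literę.")
--
--     if not any(char.isupper() for char in password):
--         messages.append("Hasło musi zawierać co najmniej jedną dużą literę.")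
--
--     if not messages:
--         return "Hasło jest wystarczająco silne."
--     else:
--         return "\n".join(messages)
-- ===== SOURCE B (Python) =====
-- def get_password_strength_message(password):
--     has_digit = has_lower = has_upper = False
--     for char in password:
--         if char.isdigit():
--             has_digit = True
--         elif char.islower():
--             has_lower = True
--         elif char.isupper():
--             has_upper = True
--     messages = []
--     if len(password) < 8:
--         messages.append("Hasło musi mieć co najmniej 8 znaków.")
--     if not has_digit:
--         messages.append("Hasło musi zawierać co najmniej jedną cyfrę.")
--     if not has_lower:
--         messages.append("Hasło musi zawierać co najmniej jedną małą literę.")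
--     if not has_upper:
--         messages.append("Hasło musi zawierać co najmniej jedną dużą literę.")
--     return "\n".join(messages) if messages else "Hasło jest wystarczająco silne."
-- ===== Notes on version B (the rewrite author's own statement) =====
-- stated objective: faster
-- what changed: B replaces A's three separate any() generator scans of the password with one explicit loop setting has_digit/has_lower/has_upper flags (mutually exclusive branches), then builds the same message list from the flags.
import Mathlib
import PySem

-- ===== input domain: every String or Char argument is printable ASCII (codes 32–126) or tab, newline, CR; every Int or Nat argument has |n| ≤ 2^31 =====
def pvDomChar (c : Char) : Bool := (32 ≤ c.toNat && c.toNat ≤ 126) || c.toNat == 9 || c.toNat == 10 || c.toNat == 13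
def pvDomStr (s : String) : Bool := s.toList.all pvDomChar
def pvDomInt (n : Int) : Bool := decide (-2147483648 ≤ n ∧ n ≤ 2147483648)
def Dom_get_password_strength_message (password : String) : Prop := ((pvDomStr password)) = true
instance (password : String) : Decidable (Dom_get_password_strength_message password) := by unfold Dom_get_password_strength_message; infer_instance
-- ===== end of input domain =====

-- B replaces A's three separate any() scans with one flag-setting loop over the characters; same messages, same order (objective: alternative).

-- ===== PORT A =====
def get_password_strength_message (password : String) : String :=
  let messages : List String := []
  let messages := if PySem.Str.len password < 8 then messages ++ ["Hasło musi mieć co najmniej 8 znaków."] else messages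
  let messages := if !(password.toList.any PySem.Chars.isdigit) then messages ++ ["Hasło musi zawierać co najmniej jedną cyfrę."] else messages
  let messages := if !(password.toList.any PySem.Chars.islower) then messages ++ ["Hasło musi zawierać co najmniej jedną małą literę."] else messages
  let messages := if !(password.toList.any PySem.Chars.isupper) then messages ++ ["Hasło musi zawierać co najmniej jedną dużą literę."] else messages
  if messages = [] then "Hasło jest wystarczająco silne."
  else PySem.Str.join "\n" messages

-- ===== PORT B =====
-- the loop body of Source B: if char.isdigit / elif char.islower / elif char.isupper
def pvFlagStep (s : Bool × Bool × Bool) (c : Char) : Bool × Bool × Bool :=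
  if PySem.Chars.isdigit c then (true, s.2.1, s.2.2)
  else if PySem.Chars.islower c then (s.1, true, s.2.2)
  else if PySem.Chars.isupper c then (s.1, s.2.1, true)
  else s

def get_password_strength_message_alt (password : String) : String :=
  let flags := password.toList.foldl pvFlagStep (false, false, false)
  let messages : List String := []
  let messages := if PySem.Str.len password < 8 then messages ++ ["Hasło musi mieć co najmniej 8 znaków."] else messages
  let messages := if !flags.1 then messages ++ ["Hasło musi zawierać co najmniej jedną cyfrę."] else messages
  let messages := if !flags.2.1 then messages ++ ["Hasło musi zawierać co najmniej jedną małą literę."] else messages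
  let messages := if !flags.2.2 then messages ++ ["Hasło musi zawierać co najmniej jedną dużą literę."] else messages
  if messages ≠ [] then PySem.Str.join "\n" messages
  else "Hasło jest wystarczająco silne."

-- ===== PRECONDITION & SPEC =====
def Spec_get_password_strength_message (password : String) (out : String) : Prop := out = get_password_strength_message_alt password
instance (password : String) (out : String) : Decidable (Spec_get_password_strength_message password out) := by unfold Spec_get_password_strength_message; infer_instance

-- ===== CLAIM (what is proved, stated in full; the proofs are below) =====
def Claim_equal_get_password_strength_message : Prop := ∀ (password : String), Dom_get_password_strength_message password → Spec_get_password_strength_message password (get_password_strength_message password)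

-- ===== LEMMAS AND PROOFS =====

theorem pv_digit_not_lower (c : Char) (h : PySem.Chars.isdigit c = true) : PySem.Chars.islower c = false := by
  simp [PySem.Chars.isdigit] at h
  simp [PySem.Chars.islower]
  intro h1
  exact absurd (le_trans h1 h.2) (by decide)

theorem pv_digit_not_upper (c : Char) (h : PySem.Chars.isdigit c = true) : PySem.Chars.isupper c = false := by
  simp [PySem.Chars.isdigit] at h
  simp [PySem.Chars.isupper]
  intro h1
  exact absurd (le_trans h1 h.2) (by decide)

theorem pv_lower_not_upper (c : Char) (h : PySem.Chars.islower c = true) : PySem.Chars.isupper c = false := by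
  simp [PySem.Chars.islower] at h
  simp [PySem.Chars.isupper]
  intro _
  exact lt_of_lt_of_le (by decide : ('Z' : Char) < 'a') h.1

theorem pv_fold_flags (l : List Char) : ∀ (d lo u : Bool),
    l.foldl pvFlagStep (d, lo, u) =
      (d || l.any PySem.Chars.isdigit, lo || l.any PySem.Chars.islower, u || l.any PySem.Chars.isupper) := by
  induction l with
  | nil => intro d lo u; simp
  | cons c t ih =>
    intro d lo u
    simp only [List.foldl_cons, List.any_cons, pvFlagStep]
    by_cases hd : PySem.Chars.isdigit c
    · simp [hd, pv_digit_not_lower c hd, pv_digit_not_upper c hd, ih]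
    · simp only [hd]
      by_cases hl : PySem.Chars.islower c
      · simp [hl, pv_lower_not_upper c hl, ih]
      · simp only [hl]
        by_cases hu : PySem.Chars.isupper c
        · simp [hu, ih]
        · simp [ih, Bool.eq_false_iff.mpr hu]

-- ===== VERDICT (by name: the statement is the Claim_ definition above) =====
theorem get_password_strength_message_spec : Claim_equal_get_password_strength_message := by
  intro password _
  unfold Spec_get_password_strength_message get_password_strength_message get_password_strength_message_alt
  rw [pv_fold_flags]
  simp only [Bool.false_or]
  split_ifs <;> simp_all
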